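-- pv_equiv track=rewrite | github.com/Jnsll/ModflowManips | cleanflowmanip/File.py | get_indexes_to_remain_in_custom_file
-- ===== SOURCE A (Python) =====
-- def get_indexes_to_remain_in_custom_file(number_lines, period):
--     ligne = 1
--     indexes = [0,1]
--     taille_period = len(period)
--     i = 0
--     while (ligne < number_lines-1):
--         ligne += period[i]
--         if (ligne < number_lines-1):
--             indexes.append(ligne)
--         if (i == (taille_period-1)):
--             i = 0
--         else:
--             i += 1
--     return indexes
-- ===== SOURCE B (Python) =====
-- def get_indexes_to_remain_in_custom_file(number_lines, period):
--     # prefix-sum decomposition: precompute cumulative sums of one period cycle,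
--     # then emit base + s per cycle, advancing base by the cycle total.
--     limit = number_lines - 1
--     indexes = [0, 1]
--     prefix = []
--     acc = 0
--     for p in period:
--         acc += p
--         prefix.append(acc)
--     base = 1
--     while base < limit:
--         for s in prefix:
--             if base + s < limit:
--                 indexes.append(base + s)
--             else:
--                 return indexes
--         base += acc
--     return indexes
-- ===== Notes on version B (the rewrite author's own statement) =====
-- stated objective: alternative
-- what changed: Replaces A's single while-loop with a modular cycling index into period by a precomputed prefix-sum list of one cycle, then a nested outer-cycles/inner-prefix loop that emits base + prefix[k] and advances base by the cycle total, returning directly on overshoot.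
import Mathlib
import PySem

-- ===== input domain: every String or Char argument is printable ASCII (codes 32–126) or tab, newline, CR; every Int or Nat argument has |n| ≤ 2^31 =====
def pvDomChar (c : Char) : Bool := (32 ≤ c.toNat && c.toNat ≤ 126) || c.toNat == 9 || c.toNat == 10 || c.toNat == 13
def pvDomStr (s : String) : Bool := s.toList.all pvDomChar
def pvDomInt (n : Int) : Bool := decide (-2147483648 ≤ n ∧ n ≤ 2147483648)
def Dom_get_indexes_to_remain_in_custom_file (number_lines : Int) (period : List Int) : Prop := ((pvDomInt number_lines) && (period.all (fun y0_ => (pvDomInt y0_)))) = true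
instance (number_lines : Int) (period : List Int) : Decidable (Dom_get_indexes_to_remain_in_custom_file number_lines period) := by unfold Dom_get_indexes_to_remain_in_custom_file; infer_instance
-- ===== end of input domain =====

-- B replaces A's single modular-index loop by a precomputed prefix-sum cycle emitted per period
-- (objective: alternative decomposition, same cost; equal return value on all inputs where A returns).

-- ===== PORT A =====
-- A's while loop as fuel recursion over the same state (ligne, indexes, i); the fuel
-- (number_lines.natAbs + 2) * period.length exceeds the number of iterations on every input
-- satisfying Pre_, so inside Pre_ the port runs A's loop to its real termination.
-- period[i]: i cycles through 0..len-1, always in range when the body runs with period ≠ [];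
-- the empty-period IndexError case is excluded by Pre_, so getD is exact there.
def pvGoA (limit : Int) (period : List Int) : Nat → Int → List Int → Nat → List Int
  | 0, _, indexes, _ => indexes
  | f+1, ligne, indexes, i =>
    if ligne < limit then
      let ligne' := ligne + period.getD i 0
      let indexes' := if ligne' < limit then indexes ++ [ligne'] else indexes
      pvGoA limit period f ligne' indexes' (if i == period.length - 1 then 0 else i + 1)
    else indexes

def get_indexes_to_remain_in_custom_file (number_lines : Int) (period : List Int) : List Int :=
  pvGoA (number_lines - 1) period ((number_lines.natAbs + 2) * period.length) 1 [0, 1] 0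

-- ===== PORT B =====
-- Source B's inner `for s in prefix` loop: returns .inl when it hits the limit (Python's `return`),
-- .inr with the grown indexes when the cycle completes.
def pvInnerB (limit base : Int) : List Int → List Int → (List Int) ⊕ (List Int)
  | [], indexes => .inr indexes
  | s :: ss, indexes =>
    if base + s < limit then pvInnerB limit base ss (indexes ++ [base + s]) else .inl indexes

-- Source B's outer `while base < limit` loop as fuel recursion; the fuel bounds the number of
-- whole cycles and exceeds the real count on every input satisfying Pre_.
def pvOuterB (limit acc : Int) (pfx : List Int) : Nat → Int → List Int → List Int
  | 0, _, indexes => indexes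
  | f+1, base, indexes =>
    if base < limit then
      match pvInnerB limit base pfx indexes with
      | .inl r => r
      | .inr idx' => pvOuterB limit acc pfx f (base + acc) idx'
    else indexes

def get_indexes_to_remain_in_custom_file_alt (number_lines : Int) (period : List Int) : List Int :=
  let limit := number_lines - 1
  -- Source B's prefix/acc building loop
  let pa := period.foldl (fun (st : List Int × Int) p => (st.1 ++ [st.2 + p], st.2 + p)) ([], 0)
  pvOuterB limit pa.2 pa.1 (number_lines.natAbs + 2) 1 [0, 1]

-- ===== PRECONDITION & SPEC =====
-- Pre_ is exactly the set of inputs on which Python A returns: outside it A either raises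
-- IndexError (period = [] with number_lines > 2) or loops forever (the cyclic cumulative sum
-- never reaches number_lines - 1); no input on which A returns a value is excluded.
def Pre_get_indexes_to_remain_in_custom_file (number_lines : Int) (period : List Int) : Prop :=
  number_lines ≤ 2 ∨
    (period ≠ [] ∧
      (0 < period.sum ∨
        ∃ k ∈ List.range (period.length + 1), number_lines - 1 ≤ 1 + (period.take k).sum))
instance (number_lines : Int) (period : List Int) : Decidable (Pre_get_indexes_to_remain_in_custom_file number_lines period) := by unfold Pre_get_indexes_to_remain_in_custom_file; infer_instance

def pvWitness_get_indexes_to_remain_in_custom_file : Int × List Int := (5, [2])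

def Spec_get_indexes_to_remain_in_custom_file (number_lines : Int) (period : List Int) (out : List Int) : Prop := out = get_indexes_to_remain_in_custom_file_alt number_lines period
instance (number_lines : Int) (period : List Int) (out : List Int) : Decidable (Spec_get_indexes_to_remain_in_custom_file number_lines period out) := by unfold Spec_get_indexes_to_remain_in_custom_file; infer_instance

-- ===== CLAIM (what is proved, stated in full; the proofs are below) =====
def Claim_equal_get_indexes_to_remain_in_custom_file : Prop := ∀ (number_lines : Int) (period : List Int), Dom_get_indexes_to_remain_in_custom_file number_lines period → Pre_get_indexes_to_remain_in_custom_file number_lines period → Spec_get_indexes_to_remain_in_custom_file number_lines period (get_indexes_to_remain_in_custom_file number_lines period)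

-- ===== LEMMAS AND PROOFS =====

-- reference inner loop: B's cycle walked with a running ligne instead of base + prefix sum
def pvInner' (limit : Int) : Int → List Int → List Int → (List Int) ⊕ (Int × List Int)
  | ligne, [], indexes => .inr (ligne, indexes)
  | ligne, p :: ps, indexes =>
    if ligne + p < limit then pvInner' limit (ligne + p) ps (indexes ++ [ligne + p]) else .inl indexes

def pvOuter' (limit : Int) (period : List Int) : Nat → Int → List Int → List Int
  | 0, _, indexes => indexes
  | f+1, base, indexes =>
    if base < limit then
      match pvInner' limit base period indexes with
      | .inl r => r
      | .inr (l', idx') => pvOuter' limit period f l' idx'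
    else indexes

def pvPrefix (a : Int) : List Int → List Int
  | [] => []
  | p :: ps => (a + p) :: pvPrefix (a + p) ps

theorem pvFold_prefix (period : List Int) : ∀ (xs : List Int) (a : Int),
    period.foldl (fun (st : List Int × Int) p => (st.1 ++ [st.2 + p], st.2 + p)) (xs, a)
      = (xs ++ pvPrefix a period, a + period.sum) := by
  induction period with
  | nil => intro xs a; simp [pvPrefix]
  | cons p ps ih =>
      intro xs a
      simp only [List.foldl_cons, ih, pvPrefix, List.sum_cons, Prod.mk.injEq]
      exact ⟨by simp, by ring⟩

theorem pvInner_corr (limit : Int) : ∀ (ps : List Int) (a base : Int) (idx : List Int),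
    pvInner' limit (base + a) ps idx
      = (match pvInnerB limit base (pvPrefix a ps) idx with
         | .inl r => .inl r
         | .inr idx' => .inr (base + a + ps.sum, idx')) := by
  intro ps
  induction ps with
  | nil => intro a base idx; simp [pvInner', pvPrefix, pvInnerB]
  | cons p ps ih =>
      intro a base idx
      simp only [pvInner', pvPrefix, pvInnerB]
      have h1 : base + a + p = base + (a + p) := by ring
      rw [h1]
      by_cases h : base + (a + p) < limit
      · simp only [h, if_pos]
        rw [ih (a + p) base (idx ++ [base + (a + p)])]
        cases hB : pvInnerB limit base (pvPrefix (a + p) ps) (idx ++ [base + (a + p)]) with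
        | inl r => rfl
        | inr idx' =>
            simp only [Sum.inr.injEq, Prod.mk.injEq, List.sum_cons]
            exact ⟨by ring, by trivial⟩
      · simp [h]

theorem pvOuterB_corr (limit : Int) (period : List Int) : ∀ (m : Nat) (base : Int) (idx : List Int),
    pvOuterB limit period.sum (pvPrefix 0 period) m base idx = pvOuter' limit period m base idx := by
  intro m
  induction m with
  | zero => intro base idx; simp [pvOuterB, pvOuter']
  | succ f ih =>
      intro base idx
      simp only [pvOuterB, pvOuter']
      by_cases h : base < limit
      · simp only [h, if_pos]
        have hc := pvInner_corr limit period 0 base idx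
        rw [add_zero] at hc
        rw [hc]
        cases hB : pvInnerB limit base (pvPrefix 0 period) idx with
        | inl r => rfl
        | inr idx' =>
            simp only []
            exact ih (base + period.sum) idx'
      · simp [h]

theorem pvGoA_stop (limit : Int) (period : List Int) (f : Nat) (ligne : Int) (idx : List Int)
    (i : Nat) (h : ¬ ligne < limit) : pvGoA limit period f ligne idx i = idx := by
  cases f with
  | zero => rfl
  | succ f => simp [pvGoA, h]

theorem pvGetD_of_drop (period : List Int) (i : Nat) (p : Int) (rest : List Int)
    (h : period.drop i = p :: rest) : period.getD i 0 = p := by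
  have h0 : (period.drop i)[0]? = period[i + 0]? := List.getElem?_drop ..
  rw [h] at h0
  simp at h0
  simp [List.getD_eq_getElem?_getD, ← h0]

theorem pvInnerA (limit : Int) (period : List Int) :
    ∀ (ps : List Int) (i f : Nat) (ligne : Int) (idx : List Int),
    period.drop i = ps → ps ≠ [] → ligne < limit →
    pvGoA limit period (ps.length + f) ligne idx i
      = (match pvInner' limit ligne ps idx with
         | .inl r => r
         | .inr (l', idx') => pvGoA limit period f l' idx' 0) := by
  intro ps
  induction ps with
  | nil => intro _ _ _ _ hd hne; exact absurd rfl hne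
  | cons p ps ih =>
      intro i f ligne idx hd _ hlt
      have hilt : i < period.length := by
        by_contra hge
        rw [List.drop_eq_nil_of_le (by omega)] at hd
        simp at hd
      have hlen : (period.drop i).length = period.length - i := List.length_drop ..
      rw [hd] at hlen
      have hget : period.getD i 0 = p := pvGetD_of_drop period i p ps hd
      have hdrop' : period.drop (i + 1) = ps := by
        have hdd : List.drop 1 (List.drop i period) = List.drop (i + 1) period := List.drop_drop
        rw [hd] at hdd
        simpa using hdd.symm
      cases ps with
      | nil =>
          -- last element of the cycle: the index wraps to 0
          have hi : i = period.length - 1 := by simp at hlen; omega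
          have hbeq : (i == period.length - 1) = true := by simp [hi]
          simp only [List.length_cons, List.length_nil, Nat.zero_add, Nat.add_comm 1 f]
          show pvGoA limit period (f + 1) ligne idx i = _
          simp only [pvGoA, hlt, if_pos, hget, hbeq]
          simp only [pvInner']
          by_cases h2 : ligne + p < limit
          · simp [h2]
          · simp only [h2, if_neg, not_false_iff]
            rw [pvGoA_stop limit period f _ idx 0 h2]
      | cons q qs =>
          -- not the last element: the index advances
          have hne2 : i ≠ period.length - 1 := by
            simp at hlen; omega
          have hbeq : (i == period.length - 1) = false := by simp [hne2]
          have hlen1 : (p :: q :: qs).length + f = ((q :: qs).length + f) + 1 := by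
            simp; omega
          rw [hlen1]
          show pvGoA limit period (((q :: qs).length + f) + 1) ligne idx i = _
          simp only [pvGoA, hlt, if_pos, hget, hbeq, Bool.false_eq_true, if_false]
          simp only [pvInner']
          by_cases h2 : ligne + p < limit
          · simp only [h2, if_pos]
            exact ih (i + 1) f (ligne + p) (idx ++ [ligne + p]) hdrop' (List.cons_ne_nil _ _) h2
          · simp only [h2, if_neg, not_false_iff]
            rw [pvGoA_stop limit period _ _ idx _ h2]

theorem pvOuter'_nil (limit : Int) : ∀ (m : Nat) (base : Int) (idx : List Int),
    pvOuter' limit [] m base idx = idx := by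
  intro m
  induction m with
  | zero => intro base idx; rfl
  | succ f ih =>
      intro base idx
      simp only [pvOuter', pvInner']
      by_cases h : base < limit
      · simp [h, ih]
      · simp [h]

theorem pvCycle (limit : Int) (period : List Int) : ∀ (m : Nat) (base : Int) (idx : List Int),
    pvGoA limit period (m * period.length) base idx 0 = pvOuter' limit period m base idx := by
  intro m
  induction m with
  | zero => intro base idx; simp [pvGoA, pvOuter']
  | succ f ih =>
      intro base idx
      cases hper : period with
      | nil =>
          simp only [List.length_nil, Nat.mul_zero]
          rw [pvOuter'_nil]
          rfl
      | cons p ps =>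
          rw [← hper]
          have hlen : (f + 1) * period.length = period.length + f * period.length := by
            rw [Nat.succ_mul]; omega
          rw [hlen]
          by_cases h : base < limit
          · rw [pvInnerA limit period period 0 (f * period.length) base idx rfl
              (by rw [hper]; exact List.cons_ne_nil _ _) h]
            simp only [pvOuter', h, if_pos]
            cases hI : pvInner' limit base period idx with
            | inl r => rfl
            | inr pr =>
                cases pr with
                | mk l' idx' => simp only []; exact ih l' idx'
          · rw [pvGoA_stop limit period _ _ idx _ h]
            simp [pvOuter', h]

theorem pvPortsEqual (number_lines : Int) (period : List Int) :
    get_indexes_to_remain_in_custom_file number_lines period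
      = get_indexes_to_remain_in_custom_file_alt number_lines period := by
  unfold get_indexes_to_remain_in_custom_file get_indexes_to_remain_in_custom_file_alt
  rw [pvCycle (number_lines - 1) period (number_lines.natAbs + 2) 1 [0, 1]]
  have hf := pvFold_prefix period [] 0
  simp only [List.nil_append, Int.zero_add] at hf
  rw [hf]
  rw [pvOuterB_corr (number_lines - 1) period (number_lines.natAbs + 2) 1 [0, 1]]

-- ===== VERDICT (by name: the statement is the Claim_ definition above) =====
theorem get_indexes_to_remain_in_custom_file_spec : Claim_equal_get_indexes_to_remain_in_custom_file := by
  intro number_lines period _ _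
  unfold Spec_get_indexes_to_remain_in_custom_file
  exact pvPortsEqual number_lines period
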